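-- pv_equiv track=rewrite | github.com/zance1054/CECS424 | Assn5.py | operatorSum
-- ===== SOURCE A (Python) =====
-- def operatorSum(number, sum):
--     result = []
--     for i in range(1, len(number) + 1):
--         #keeps us from getting double zeroes as a numIntue
--         if i == 1 or (number[0] != "0" and i > 1):
--             numInt = int(number[:i])
--             sumHelper(number[i:], number[:i], numInt, numInt, result, sum)
--
--     #accounts for negative numbers
--     number = int(number) * -1
--     number = str(number)
--     for i in range(2, len(number) + 1):
--         #keeps us from getting double zeroes as a numIntue
--         if numInt != '-' and i == 1 or (number[0] != "0" and i > 1 and numInt != '-'):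
--             numInt = int(number[:i])
--             sumHelper("-" + number[i:], number[:i], numInt, numInt, result, sum)
--
--     return result
--
-- def sumHelper(number, subNum, current, last, result, sum):
--     if not number:
--         if current == sum:
--             result.append(subNum)
--         return
--     #Processes numbers subparts at a time an adds in the operation
--     for i in range(1, len(number) + 1):
--         numInt = number[:i]
--         if numInt != '-' and i == 1 or (i > 1 and number[0] != "0" and numInt != '-'): # prevent "00*" as a numberber
--             sumHelper(number[i:], subNum + "+" + numInt, current + int(numInt), int(numInt), result, sum)
--             sumHelper(number[i:], subNum + "-" + numInt, current - int(numInt), -int(numInt), result, sum)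
-- ===== SOURCE B (Python) =====
-- def operatorSum(number, sum):
--     # Same driver as the original; the recursive helper is replaced by an
--     # iterative explicit-stack DFS (children pushed in reverse to keep order).
--     result = []
--
--     def dfs(rem, prefix, current):
--         stack = [(rem, prefix, current)]
--         while stack:
--             rem, prefix, current = stack.pop()
--             if not rem:
--                 if current == sum:
--                     result.append(prefix)
--                 continue
--             children = []
--             for i in range(1, len(rem) + 1):
--                 part = rem[:i]
--                 if (part != '-' and i == 1) or (i > 1 and rem[0] != '0' and part != '-'):
--                     v = int(part)
--                     children.append((rem[i:], prefix + "+" + part, current + v))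
--                     children.append((rem[i:], prefix + "-" + part, current - v))
--             stack.extend(reversed(children))
--
--     for i in range(1, len(number) + 1):
--         if i == 1 or number[0] != "0":
--             dfs(number[i:], number[:i], int(number[:i]))
--
--     neg = str(-int(number))
--     for i in range(2, len(neg) + 1):
--         if neg[0] != "0":
--             dfs("-" + neg[i:], neg[:i], int(neg[:i]))
--
--     return result
-- ===== Notes on version B (the rewrite author's own statement) =====
-- stated objective: alternative
-- what changed: The recursive sumHelper is replaced by an iterative explicit-stack DFS (frames of remaining-string/prefix/running-total, children pushed in reverse so the pre-order output matches), and the drivers' guards are written in simplified equivalent form.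
import Mathlib
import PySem

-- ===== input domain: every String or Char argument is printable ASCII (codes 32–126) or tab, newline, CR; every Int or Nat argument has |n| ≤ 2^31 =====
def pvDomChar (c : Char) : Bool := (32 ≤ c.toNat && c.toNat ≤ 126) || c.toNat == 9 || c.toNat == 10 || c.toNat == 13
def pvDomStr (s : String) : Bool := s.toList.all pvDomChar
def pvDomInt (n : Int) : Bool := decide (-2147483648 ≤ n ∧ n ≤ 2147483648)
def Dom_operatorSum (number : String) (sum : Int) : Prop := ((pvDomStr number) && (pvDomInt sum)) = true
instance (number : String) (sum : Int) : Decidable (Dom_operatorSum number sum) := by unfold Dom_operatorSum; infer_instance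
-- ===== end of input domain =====

-- B replaces the recursive helper by an iterative explicit-stack DFS (same output, same cost); return-value equivalence.

-- ===== PORT A =====
-- int(s) for the substrings A feeds to int(); Pre_ keeps us where Python's int() succeeds
def pyIntC (cs : List Char) : Int := (PySem.Int.ofChars? cs).getD 0

-- literal port of sumHelper: `result` becomes the returned list of appends, in order
def sumHelperA (number subNum : List Char) (current last sumv : Int) : List String :=
  if _h : number = [] then
    (if current = sumv then [String.mk subNum] else [])
  else
    ((List.range' 1 number.length).attach.map (fun x =>
        let i := x.1
        let numInt := number.take i
        if (numInt ≠ ['-'] ∧ i = 1) ∨ (1 < i ∧ number.head? ≠ some '0' ∧ numInt ≠ ['-']) then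
          sumHelperA (number.drop i) (subNum ++ '+' :: numInt) (current + pyIntC numInt) (pyIntC numInt) sumv
          ++ sumHelperA (number.drop i) (subNum ++ '-' :: numInt) (current - pyIntC numInt) (- pyIntC numInt) sumv
        else [])).flatten
termination_by number.length
decreasing_by
  all_goals
    have hx := x.2
    have h1 : 1 ≤ x.1 := by
      have := List.mem_range'_1.mp hx
      omega
    have h0 : 0 < number.length := List.length_pos_iff.mpr _h
    simp only [List.length_drop]
    omega

def operatorSum (number : String) (sum : Int) : List String :=
  -- first loop, then (number = str(int(number) * -1)) the second loop; the leftover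
  -- `numInt` is an int there, so `numInt != '-'` is always True and is dropped
  ((List.range' 1 number.toList.length).map (fun i =>
      if i = 1 ∨ (number.toList.head? ≠ some '0' ∧ 1 < i) then
        sumHelperA (number.toList.drop i) (number.toList.take i)
          (pyIntC (number.toList.take i)) (pyIntC (number.toList.take i)) sum
      else [])).flatten
  ++ ((List.range' 2 ((PySem.Int.toChars (-(pyIntC number.toList))).length - 1)).map (fun i =>
      if i = 1 ∨ ((PySem.Int.toChars (-(pyIntC number.toList))).head? ≠ some '0' ∧ 1 < i) then
        sumHelperA ('-' :: (PySem.Int.toChars (-(pyIntC number.toList))).drop i)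
          ((PySem.Int.toChars (-(pyIntC number.toList))).take i)
          (pyIntC ((PySem.Int.toChars (-(pyIntC number.toList))).take i))
          (pyIntC ((PySem.Int.toChars (-(pyIntC number.toList))).take i)) sum
      else [])).flatten

-- ===== PORT B =====
-- the `children` list built for one popped frame (rem, prefix, current)
def pvChildren (rem pre : List Char) (cur : Int) : List (List Char × List Char × Int) :=
  ((List.range' 1 rem.length).map (fun i =>
      let part := rem.take i
      if (part ≠ ['-'] ∧ i = 1) ∨ (1 < i ∧ rem.head? ≠ some '0' ∧ part ≠ ['-']) then
        [(rem.drop i, pre ++ '+' :: part, cur + pyIntC part),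
         (rem.drop i, pre ++ '-' :: part, cur - pyIntC part)]
      else [])).flatten

-- termination measure for the stack loop
def pvM (S : List (List Char × List Char × Int)) : Nat :=
  (S.map (fun f => 4 ^ f.1.length)).sum

lemma pvM_append (S T : List (List Char × List Char × Int)) :
    pvM (S ++ T) = pvM S + pvM T := by
  simp [pvM]

lemma pv_sum_geom (n : Nat) :
    3 * ((List.range' 1 n).map (fun i => 2 * 4 ^ (n - i))).sum + 2 = 2 * 4 ^ n := by
  induction n with
  | zero => simp
  | succ n ih =>
    have hr : List.range' 1 (n + 1) = List.range' 1 n ++ [n + 1] := by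
      have := List.range'_concat (s := 1) (n := n) (step := 1)
      simpa [Nat.add_comm] using this
    rw [hr]
    rw [List.map_append, List.sum_append]
    have hcongr : (List.range' 1 n).map (fun i => 2 * 4 ^ (n + 1 - i))
        = (List.range' 1 n).map (fun i => 4 * (2 * 4 ^ (n - i))) := by
      apply List.map_congr_left
      intro i hi
      have hmem := List.mem_range'_1.mp hi
      have : n + 1 - i = (n - i) + 1 := by omega
      rw [this, pow_succ]
      ring
    rw [hcongr, List.sum_map_mul_left]
    simp only [List.map_cons, List.map_nil, List.sum_cons, List.sum_nil]
    have h1 : n + 1 - (n + 1) = 0 := by omega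
    rw [h1]
    have hp : (4 : Nat) ^ (n + 1) = 4 ^ n * 4 := pow_succ 4 n
    omega

lemma pvM_children_lt (rem pre : List Char) (cur : Int) (h : rem ≠ []) :
    pvM (pvChildren rem pre cur) < 4 ^ rem.length := by
  have hM : pvM (pvChildren rem pre cur)
      ≤ ((List.range' 1 rem.length).map (fun i => 2 * 4 ^ (rem.length - i))).sum := by
    unfold pvChildren pvM
    rw [List.map_flatten, List.sum_flatten, List.map_map, List.map_map]
    apply List.sum_le_sum
    intro i _hi
    simp only [Function.comp]
    split
    · simp [List.length_drop]; omega
    · simp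
  have hg := pv_sum_geom rem.length
  have hpos : 1 ≤ (4 : Nat) ^ rem.length := Nat.one_le_pow _ _ (by norm_num)
  refine lt_of_le_of_lt hM ?_
  omega

-- iterative DFS over an explicit stack (head = top); children go on in A's order
def dfsB (sumv : Int) (stack : List (List Char × List Char × Int)) : List String :=
  match stack with
  | [] => []
  | (rem, pre, cur) :: S =>
    if h : rem = [] then
      (if cur = sumv then [String.mk pre] else []) ++ dfsB sumv S
    else
      dfsB sumv (pvChildren rem pre cur ++ S)
termination_by pvM stack
decreasing_by
  · have h4 : 1 ≤ (4:Nat) ^ rem.length := Nat.one_le_pow _ _ (by norm_num)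
    have hc : pvM ((rem, pre, cur) :: S) = 4 ^ rem.length + pvM S := by simp [pvM]
    omega
  · have h2 := pvM_children_lt rem pre cur h
    have hc : pvM ((rem, pre, cur) :: S) = 4 ^ rem.length + pvM S := by simp [pvM]
    rw [pvM_append]
    omega

def operatorSum_alt (number : String) (sum : Int) : List String :=
  ((List.range' 1 number.toList.length).map (fun i =>
      if i = 1 ∨ number.toList.head? ≠ some '0' then
        dfsB sum [(number.toList.drop i, number.toList.take i, pyIntC (number.toList.take i))]
      else [])).flatten
  ++ ((List.range' 2 ((PySem.Int.toChars (-(pyIntC number.toList))).length - 1)).map (fun i =>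
      if (PySem.Int.toChars (-(pyIntC number.toList))).head? ≠ some '0' then
        dfsB sum [('-' :: (PySem.Int.toChars (-(pyIntC number.toList))).drop i,
                   (PySem.Int.toChars (-(pyIntC number.toList))).take i,
                   pyIntC ((PySem.Int.toChars (-(pyIntC number.toList))).take i))]
      else [])).flatten

-- ===== PRECONDITION & SPEC =====
-- Pre_ excludes exactly the inputs on which Python A raises (ValueError from int()):
-- the empty string and any string containing a non-digit character.
def Pre_operatorSum (number : String) (sum : Int) : Prop :=
  number.toList ≠ [] ∧ number.toList.all Char.isDigit = true
instance (number : String) (sum : Int) : Decidable (Pre_operatorSum number sum) := by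
  unfold Pre_operatorSum; infer_instance

def pvWitness_operatorSum : String × Int := ("123", 0)

def Spec_operatorSum (number : String) (sum : Int) (out : List String) : Prop := out = operatorSum_alt number sum
instance (number : String) (sum : Int) (out : List String) : Decidable (Spec_operatorSum number sum out) := by unfold Spec_operatorSum; infer_instance

-- ===== CLAIM (what is proved, stated in full; the proofs are below) =====
def Claim_equal_operatorSum : Prop := ∀ (number : String) (sum : Int), Dom_operatorSum number sum → Pre_operatorSum number sum → Spec_operatorSum number sum (operatorSum number sum)

-- ===== LEMMAS AND PROOFS =====

lemma dfsB_nil (sumv : Int) : dfsB sumv [] = [] := by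
  simp [dfsB]

lemma dfsB_append (sumv : Int) (S1 S2 : List (List Char × List Char × Int)) :
    dfsB sumv (S1 ++ S2) = dfsB sumv S1 ++ dfsB sumv S2 := by
  generalize hn : pvM S1 = n
  induction n using Nat.strong_induction_on generalizing S1 S2 with
  | _ n ih =>
    match S1 with
    | [] => simp [dfsB_nil]
    | (rem, pre, cur) :: T =>
      by_cases h : rem = []
      · subst h
        rw [List.cons_append, dfsB, dfsB]
        simp only [dite_true]
        rw [ih (pvM T) (by
          have hc : pvM (([], pre, cur) :: T) = 1 + pvM T := by simp [pvM]
          omega) T S2 rfl]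
        simp
      · rw [List.cons_append, dfsB, dfsB]
        rw [dif_neg h, dif_neg h]
        rw [← List.append_assoc]
        have hlt : pvM (pvChildren rem pre cur ++ T) < n := by
          rw [pvM_append]
          have h2 := pvM_children_lt rem pre cur h
          have hc : pvM ((rem, pre, cur) :: T) = 4 ^ rem.length + pvM T := by simp [pvM]
          omega
        exact ih _ hlt _ S2 rfl

lemma dfsB_flatten (sumv : Int) (L : List (List (List Char × List Char × Int))) :
    dfsB sumv L.flatten = (L.map (dfsB sumv)).flatten := by
  induction L with
  | nil => simp [dfsB_nil]
  | cons x xs ih => simp [List.flatten_cons, dfsB_append, ih]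

lemma dfsB_single (sumv : Int) :
    ∀ (rem pre : List Char) (cur last : Int),
      dfsB sumv [(rem, pre, cur)] = sumHelperA rem pre cur last sumv := by
  intro rem
  generalize hn : rem.length = n
  induction n using Nat.strong_induction_on generalizing rem with
  | _ n ih =>
    intro pre cur last
    by_cases h : rem = []
    · subst h
      rw [dfsB, sumHelperA]
      simp [dfsB_nil]
    · rw [dfsB, sumHelperA, dif_neg h, dif_neg h]
      rw [List.append_nil]
      unfold pvChildren
      rw [dfsB_flatten, List.map_map]
      have hattach : ((List.range' 1 rem.length).attach.map (fun x =>
          let i := x.1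
          let numInt := rem.take i
          if (numInt ≠ ['-'] ∧ i = 1) ∨ (1 < i ∧ rem.head? ≠ some '0' ∧ numInt ≠ ['-']) then
            sumHelperA (rem.drop i) (pre ++ '+' :: numInt) (cur + pyIntC numInt) (pyIntC numInt) sumv
            ++ sumHelperA (rem.drop i) (pre ++ '-' :: numInt) (cur - pyIntC numInt) (- pyIntC numInt) sumv
          else []))
          = ((List.range' 1 rem.length).map (fun i =>
          let numInt := rem.take i
          if (numInt ≠ ['-'] ∧ i = 1) ∨ (1 < i ∧ rem.head? ≠ some '0' ∧ numInt ≠ ['-']) then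
            sumHelperA (rem.drop i) (pre ++ '+' :: numInt) (cur + pyIntC numInt) (pyIntC numInt) sumv
            ++ sumHelperA (rem.drop i) (pre ++ '-' :: numInt) (cur - pyIntC numInt) (- pyIntC numInt) sumv
          else [])) := by
        exact List.attach_map_val (l := List.range' 1 rem.length)
          (f := fun i =>
            let numInt := rem.take i
            if (numInt ≠ ['-'] ∧ i = 1) ∨ (1 < i ∧ rem.head? ≠ some '0' ∧ numInt ≠ ['-']) then
              sumHelperA (rem.drop i) (pre ++ '+' :: numInt) (cur + pyIntC numInt) (pyIntC numInt) sumv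
              ++ sumHelperA (rem.drop i) (pre ++ '-' :: numInt) (cur - pyIntC numInt) (- pyIntC numInt) sumv
            else [])
      rw [hattach]
      congr 1
      apply List.map_congr_left
      intro i hi
      have hmem := List.mem_range'_1.mp hi
      have hlen : (rem.drop i).length < n := by
        have : rem ≠ [] := h
        have h0 : 0 < rem.length := List.length_pos_iff.mpr this
        simp [List.length_drop]; omega
      simp only [Function.comp]
      split
      · rw [show ([(rem.drop i, pre ++ '+' :: rem.take i, cur + pyIntC (rem.take i)),
              (rem.drop i, pre ++ '-' :: rem.take i, cur - pyIntC (rem.take i))] :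
              List (List Char × List Char × Int))
            = [(rem.drop i, pre ++ '+' :: rem.take i, cur + pyIntC (rem.take i))]
              ++ [(rem.drop i, pre ++ '-' :: rem.take i, cur - pyIntC (rem.take i))] from rfl]
        rw [dfsB_append]
        rw [ih _ hlen _ rfl _ _ (pyIntC (rem.take i)),
            ih _ hlen _ rfl _ _ (- pyIntC (rem.take i))]
      · exact dfsB_nil sumv

-- ===== VERDICT (by name: the statement is the Claim_ definition above) =====
theorem operatorSum_spec : Claim_equal_operatorSum := by
  intro number sum _hdom _hpre
  unfold Spec_operatorSum operatorSum operatorSum_alt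
  congr 1
  · congr 1
    apply List.map_congr_left
    intro i hi
    have hmem := List.mem_range'_1.mp hi
    have hiff : (i = 1 ∨ (number.toList.head? ≠ some '0' ∧ 1 < i)) ↔ (i = 1 ∨ number.toList.head? ≠ some '0') := by
      constructor
      · rintro (h | ⟨h, _⟩); exact Or.inl h; exact Or.inr h
      · rintro (h | h)
        · exact Or.inl h
        · by_cases h1 : i = 1
          · exact Or.inl h1
          · exact Or.inr ⟨h, by omega⟩
    by_cases hg : i = 1 ∨ (number.toList.head? ≠ some '0' ∧ 1 < i)
    · rw [if_pos hg, if_pos (hiff.mp hg), dfsB_single]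
    · rw [if_neg hg, if_neg (fun hc => hg (hiff.mpr hc))]
  · congr 1
    apply List.map_congr_left
    intro i hi
    have hmem := List.mem_range'_1.mp hi
    have h2 : 2 ≤ i := by omega
    have hiff : (i = 1 ∨ ((PySem.Int.toChars (-(pyIntC number.toList))).head? ≠ some '0' ∧ 1 < i))
        ↔ ((PySem.Int.toChars (-(pyIntC number.toList))).head? ≠ some '0') := by
      constructor
      · rintro (h | ⟨h, _⟩); omega; exact h
      · intro h; exact Or.inr ⟨h, by omega⟩
    by_cases hg : i = 1 ∨ ((PySem.Int.toChars (-(pyIntC number.toList))).head? ≠ some '0' ∧ 1 < i)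
    · rw [if_pos hg, if_pos (hiff.mp hg), dfsB_single]
    · rw [if_neg hg, if_neg (fun hc => hg (hiff.mpr hc))]
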